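-- pv_equiv track=rewrite | github.com/mshea/useful_scripts | build_frwiki_xml.py | _is_infobox
-- ===== SOURCE A (Python) =====
-- INFOBOX_TO_CAT = {
--     'person':       'Characters',
--     'npc':          'Characters',
--     'creature':     'Creatures',
--     'race':         'Creatures',
--     'location':     'Places',
--     'building':     'Places',
--     'settlement':   'Places',
--     'spell':        'Spells',
--     'item':         'Items & Artifacts',
--     'book':         'Books & Media',
--     'organization': 'Organizations',
--     'deity':        'Deities & Religion',
--     'demigod':      'Deities & Religion',
--     'class':        'Classes',
-- }
--
-- def _is_infobox(template_name):
--     """Return True if the template name looks like an article infobox."""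
--     n = template_name.strip().lower()
--     for key in INFOBOX_TO_CAT:
--         if n == key or n.startswith(key + ' ') or n.startswith(key + '/'):
--             return True
--     # catch additional infobox types not in INFOBOX_TO_CAT
--     extra = {'book', 'adventure', 'spell', 'item', 'location', 'building',
--              'organization', 'deity', 'creature', 'person', 'class', 'race'}
--     return any(n == k or n.startswith(k + ' ') for k in extra)
-- ===== SOURCE B (Python) =====
-- INFOBOX_TO_CAT = {
--     'person':       'Characters',
--     'npc':          'Characters',
--     'creature':     'Creatures',
--     'race':         'Creatures',
--     'location':     'Places',
--     'building':     'Places',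
--     'settlement':   'Places',
--     'spell':        'Spells',
--     'item':         'Items & Artifacts',
--     'book':         'Books & Media',
--     'organization': 'Organizations',
--     'deity':        'Deities & Religion',
--     'demigod':      'Deities & Religion',
--     'class':        'Classes',
-- }
--
-- def _is_infobox(template_name):
--     """Return True if the template name looks like an article infobox."""
--     n = template_name.strip().lower()
--     word = n.split(' ', 1)[0]          # up to the first space
--     head = word.split('/', 1)[0]       # then up to the first slash
--     # every dict key accepts a trailing ' ' or '/'; of the extra set only
--     # 'adventure' adds anything, and it accepts a trailing space only
--     return head in INFOBOX_TO_CAT or word == 'adventure'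
-- ===== Notes on version B (the rewrite author's own statement) =====
-- stated objective: simpler
-- what changed: A scans 14 dict keys testing three prefix forms each and then a 12-member extra set; B extracts the first space-delimited word and its slash-head once and does two membership tests (head in the dict, word == 'adventure').
import Mathlib
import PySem

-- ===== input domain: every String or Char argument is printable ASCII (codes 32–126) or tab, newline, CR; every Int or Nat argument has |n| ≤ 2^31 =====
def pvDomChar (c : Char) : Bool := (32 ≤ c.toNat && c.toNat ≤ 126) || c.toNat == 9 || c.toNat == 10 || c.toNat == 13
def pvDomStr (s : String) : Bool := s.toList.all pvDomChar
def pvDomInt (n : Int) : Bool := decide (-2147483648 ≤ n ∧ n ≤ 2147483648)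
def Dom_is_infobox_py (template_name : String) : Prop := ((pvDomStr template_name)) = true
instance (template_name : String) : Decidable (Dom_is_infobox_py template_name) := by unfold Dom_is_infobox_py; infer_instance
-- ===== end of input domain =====

-- B replaces A's per-key prefix scan (key, key+' ', key+'/' for 14 dict keys, then a 12-member extra set)
-- by extracting the first space-delimited word and its slash-head once, then two membership tests (objective: simpler).

-- ===== PORT A =====
-- strings are handled as code-point lists (PySem.Chars); the module dict with its (unused here) values:
def INFOBOX_TO_CAT : PySem.Dict (List Char) String := PySem.Dict.ofList
  [ ("person".toList, "Characters"), ("npc".toList, "Characters"),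
    ("creature".toList, "Creatures"), ("race".toList, "Creatures"),
    ("location".toList, "Places"), ("building".toList, "Places"),
    ("settlement".toList, "Places"), ("spell".toList, "Spells"),
    ("item".toList, "Items & Artifacts"), ("book".toList, "Books & Media"),
    ("organization".toList, "Organizations"), ("deity".toList, "Deities & Religion"),
    ("demigod".toList, "Deities & Religion"), ("class".toList, "Classes") ]

-- the set literal 'extra' of A (all elements distinct)
def extraSet : PySem.Set (List Char) := PySem.Set.ofList
  [ "book".toList, "adventure".toList, "spell".toList, "item".toList, "location".toList,
    "building".toList, "organization".toList, "deity".toList, "creature".toList,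
    "person".toList, "class".toList, "race".toList ]

-- A: loop over the dict keys with an early return (ported as List.any), then any(...) over extra
def is_infobox_py (template_name : String) : Bool :=
  let n := PySem.Chars.lower (PySem.Chars.strip template_name.toList)
  if INFOBOX_TO_CAT.keys.any (fun key =>
      n == key || PySem.Chars.startswith n (key ++ [' ']) || PySem.Chars.startswith n (key ++ ['/'])) then
    true
  else
    extraSet.any (fun k => n == k || PySem.Chars.startswith n (k ++ [' ']))

-- ===== PORT B =====
-- Source B's _head(s, delim): scan s, return the prefix before the first delim (structural recursion)
def headTok (d : Char) : List Char → List Char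
  | [] => []
  | c :: cs => if c = d then [] else c :: headTok d cs

def is_infobox_py_alt (template_name : String) : Bool :=
  let n := PySem.Chars.lower (PySem.Chars.strip template_name.toList)
  let word := headTok ' ' n
  let head := headTok '/' word
  (INFOBOX_TO_CAT.get? head).isSome || word == "adventure".toList

-- ===== PRECONDITION & SPEC =====
def Spec_is_infobox_py (template_name : String) (out : Bool) : Prop := out = is_infobox_py_alt template_name
instance (template_name : String) (out : Bool) : Decidable (Spec_is_infobox_py template_name out) := by unfold Spec_is_infobox_py; infer_instance

-- ===== CLAIM (what is proved, stated in full; the proofs are below) =====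
def Claim_equal_is_infobox_py : Prop := ∀ (template_name : String), Dom_is_infobox_py template_name → Spec_is_infobox_py template_name (is_infobox_py template_name)

-- ===== LEMMAS AND PROOFS =====

lemma headTok_eq_iff (d : Char) (k : List Char) (hk : d ∉ k) (n : List Char) :
    headTok d n = k ↔ (n = k ∨ (k ++ [d]) <+: n) := by
  induction k generalizing n with
  | nil =>
    cases n with
    | nil => simp [headTok]
    | cons c cs =>
      by_cases hc : c = d
      · subst hc; simp [headTok]
      · simp [headTok, hc, List.cons_prefix_cons, Ne.symm hc]
  | cons a k' ih =>
    have had : a ≠ d := fun h => hk (h ▸ List.mem_cons_self)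
    have hk' : d ∉ k' := fun h => hk (List.mem_cons_of_mem a h)
    cases n with
    | nil => simp [headTok]
    | cons c cs =>
      by_cases hc : c = d
      · subst hc
        rw [show headTok c (c :: cs) = [] from by simp [headTok]]
        constructor
        · intro h; exact absurd h (by simp)
        · rintro (h | h)
          · exact absurd (List.cons.inj h).1 (Ne.symm had)
          · rw [List.cons_append, List.cons_prefix_cons] at h
            exact absurd h.1 had
      · simp only [headTok, if_neg hc, List.cons_append, List.cons_prefix_cons, List.cons.injEq]
        rw [ih hk']
        tauto

lemma prefix_headTok_iff (d : Char) (p : List Char) (hp : d ∉ p) (n : List Char) :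
    p <+: headTok d n ↔ p <+: n := by
  induction p generalizing n with
  | nil => simp
  | cons a p' ih =>
    have had : a ≠ d := fun h => hp (h ▸ List.mem_cons_self)
    have hp' : d ∉ p' := fun h => hp (List.mem_cons_of_mem a h)
    cases n with
    | nil => simp [headTok]
    | cons c cs =>
      by_cases hc : c = d
      · subst hc
        rw [show headTok c (c :: cs) = [] from by simp [headTok]]
        constructor
        · intro h; exact absurd h (by simp)
        · intro h; exact absurd (List.cons_prefix_cons.mp h).1 had
      · simp only [headTok, if_neg hc, List.cons_prefix_cons]
        rw [ih hp']

-- for a key containing neither delimiter, A's three-way test is exactly "slash-head of space-head = key"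
lemma key_iff (k : List Char) (hs : ' ' ∉ k) (hsl : '/' ∉ k) (n : List Char) :
    headTok '/' (headTok ' ' n) = k ↔ (n = k ∨ (k ++ [' ']) <+: n ∨ (k ++ ['/']) <+: n) := by
  rw [headTok_eq_iff '/' k hsl, headTok_eq_iff ' ' k hs,
    prefix_headTok_iff ' ' (k ++ ['/']) (by simp [hs]) n]
  tauto

-- B's membership test '(get? head).isSome' as a disjunction over the 14 literal keys
lemma get_isSome_iff (h : List Char) :
    (INFOBOX_TO_CAT.get? h).isSome = true ↔
      (h = "person".toList ∨ h = "npc".toList ∨ h = "creature".toList ∨ h = "race".toList ∨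
       h = "location".toList ∨ h = "building".toList ∨ h = "settlement".toList ∨ h = "spell".toList ∨
       h = "item".toList ∨ h = "book".toList ∨ h = "organization".toList ∨ h = "deity".toList ∨
       h = "demigod".toList ∨ h = "class".toList) := by
  rw [PySem.Dict.get?, show INFOBOX_TO_CAT.items =
    [ ("person".toList, "Characters"), ("npc".toList, "Characters"),
      ("creature".toList, "Creatures"), ("race".toList, "Creatures"),
      ("location".toList, "Places"), ("building".toList, "Places"),
      ("settlement".toList, "Places"), ("spell".toList, "Spells"),
      ("item".toList, "Items & Artifacts"), ("book".toList, "Books & Media"),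
      ("organization".toList, "Organizations"), ("deity".toList, "Deities & Religion"),
      ("demigod".toList, "Deities & Religion"), ("class".toList, "Classes") ] from by decide,
    Option.isSome_map, List.find?_isSome]
  simp
  tauto

-- for a delimiter-free list, headTok is the identity
lemma headTok_id (d : Char) (k : List Char) (hk : d ∉ k) : headTok d k = k := by
  induction k with
  | nil => rfl
  | cons a k' ih =>
    have had : a ≠ d := fun h => hk (h ▸ List.mem_cons_self)
    simp [headTok, had, ih (fun h => hk (List.mem_cons_of_mem a h))]

-- A's three-way test for one delimiter-free key, as a Bool equation
lemma cond3_eq (n k : List Char) (hs : ' ' ∉ k) (hsl : '/' ∉ k) :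
    (n == k || PySem.Chars.startswith n (k ++ [' ']) || PySem.Chars.startswith n (k ++ ['/'])) =
      (headTok '/' (headTok ' ' n) == k) := by
  rw [Bool.eq_iff_iff]
  simp only [Bool.or_eq_true, beq_iff_eq, PySem.Chars.startswith_iff]
  rw [key_iff k hs hsl n]
  tauto

-- A's two-way test (extra set) for one space-free key, as a Bool equation
lemma cond2_eq (n k : List Char) (hs : ' ' ∉ k) :
    (n == k || PySem.Chars.startswith n (k ++ [' '])) = (headTok ' ' n == k) := by
  rw [Bool.eq_iff_iff]
  simp only [Bool.or_eq_true, beq_iff_eq, PySem.Chars.startswith_iff]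
  rw [headTok_eq_iff ' ' k hs n]

def keysLit : List (List Char) :=
  [ "person".toList, "npc".toList, "creature".toList, "race".toList, "location".toList,
    "building".toList, "settlement".toList, "spell".toList, "item".toList, "book".toList,
    "organization".toList, "deity".toList, "demigod".toList, "class".toList ]

lemma get_isSome_any (h : List Char) :
    (INFOBOX_TO_CAT.get? h).isSome = keysLit.any (fun k => h == k) := by
  rw [Bool.eq_iff_iff, get_isSome_iff]
  simp only [keysLit, List.any_cons, List.any_nil, Bool.or_false, Bool.or_eq_true, beq_iff_eq]

-- the heart of the equivalence, on the normalized character list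
lemma core (n : List Char) :
    (if INFOBOX_TO_CAT.keys.any (fun key =>
        n == key || PySem.Chars.startswith n (key ++ [' ']) || PySem.Chars.startswith n (key ++ ['/'])) then
      true
     else
      extraSet.any (fun k => n == k || PySem.Chars.startswith n (k ++ [' ']))) =
    ((INFOBOX_TO_CAT.get? (headTok '/' (headTok ' ' n))).isSome || (headTok ' ' n == "adventure".toList)) := by
  have hkeys : INFOBOX_TO_CAT.keys = keysLit := by decide
  have hextra : extraSet =
      [ "book".toList, "adventure".toList, "spell".toList, "item".toList, "location".toList,
        "building".toList, "organization".toList, "deity".toList, "creature".toList,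
        "person".toList, "class".toList, "race".toList ] := by decide
  set word := headTok ' ' n with hword
  set head := headTok '/' word with hhead
  have h3 : (INFOBOX_TO_CAT.keys.any (fun key =>
      n == key || PySem.Chars.startswith n (key ++ [' ']) || PySem.Chars.startswith n (key ++ ['/']))) =
      keysLit.any (fun k => head == k) := by
    rw [hkeys]
    simp only [keysLit, List.any_cons, List.any_nil]
    rw [cond3_eq n "person".toList (by decide) (by decide),
      cond3_eq n "npc".toList (by decide) (by decide),
      cond3_eq n "creature".toList (by decide) (by decide),
      cond3_eq n "race".toList (by decide) (by decide),
      cond3_eq n "location".toList (by decide) (by decide),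
      cond3_eq n "building".toList (by decide) (by decide),
      cond3_eq n "settlement".toList (by decide) (by decide),
      cond3_eq n "spell".toList (by decide) (by decide),
      cond3_eq n "item".toList (by decide) (by decide),
      cond3_eq n "book".toList (by decide) (by decide),
      cond3_eq n "organization".toList (by decide) (by decide),
      cond3_eq n "deity".toList (by decide) (by decide),
      cond3_eq n "demigod".toList (by decide) (by decide),
      cond3_eq n "class".toList (by decide) (by decide)]
  have h2 : (extraSet.any (fun k => n == k || PySem.Chars.startswith n (k ++ [' ']))) =
      extraSet.any (fun k => word == k) := by
    rw [hextra]
    simp only [List.any_cons, List.any_nil]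
    rw [cond2_eq n "book".toList (by decide),
      cond2_eq n "adventure".toList (by decide),
      cond2_eq n "spell".toList (by decide),
      cond2_eq n "item".toList (by decide),
      cond2_eq n "location".toList (by decide),
      cond2_eq n "building".toList (by decide),
      cond2_eq n "organization".toList (by decide),
      cond2_eq n "deity".toList (by decide),
      cond2_eq n "creature".toList (by decide),
      cond2_eq n "person".toList (by decide),
      cond2_eq n "class".toList (by decide),
      cond2_eq n "race".toList (by decide)]
  rw [h3, h2, get_isSome_any]
  cases hA : keysLit.any (fun k => head == k) with
  | true => simp
  | false =>
    simp only [Bool.false_eq_true, if_false, Bool.false_or]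
    -- every extra member except 'adventure' is a dict key and would already have fired
    have hne : ∀ k ∈ keysLit, ¬ head = k := by
      simpa [keysLit, List.any_cons, List.any_nil] using hA
    have hwk : ∀ k ∈ keysLit, '/' ∉ k → word ≠ k := by
      intro k hk hslash h
      exact hne k hk (by rw [hhead, h, headTok_id '/' k hslash])
    rw [hextra]
    simp only [List.any_cons, List.any_nil, Bool.or_false]
    have e1 : (word == "book".toList) = false := by
      simpa using hwk "book".toList (by decide) (by decide)
    have e2 : (word == "spell".toList) = false := by
      simpa using hwk "spell".toList (by decide) (by decide)
    have e3 : (word == "item".toList) = false := by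
      simpa using hwk "item".toList (by decide) (by decide)
    have e4 : (word == "location".toList) = false := by
      simpa using hwk "location".toList (by decide) (by decide)
    have e5 : (word == "building".toList) = false := by
      simpa using hwk "building".toList (by decide) (by decide)
    have e6 : (word == "organization".toList) = false := by
      simpa using hwk "organization".toList (by decide) (by decide)
    have e7 : (word == "deity".toList) = false := by
      simpa using hwk "deity".toList (by decide) (by decide)
    have e8 : (word == "creature".toList) = false := by
      simpa using hwk "creature".toList (by decide) (by decide)
    have e9 : (word == "person".toList) = false := by
      simpa using hwk "person".toList (by decide) (by decide)
    have e10 : (word == "class".toList) = false := by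
      simpa using hwk "class".toList (by decide) (by decide)
    have e11 : (word == "race".toList) = false := by
      simpa using hwk "race".toList (by decide) (by decide)
    rw [e1, e2, e3, e4, e5, e6, e7, e8, e9, e10, e11]
    simp

-- ===== VERDICT (by name: the statement is the Claim_ definition above) =====
theorem is_infobox_py_spec : Claim_equal_is_infobox_py := by
  intro s _
  simp only [Spec_is_infobox_py, is_infobox_py, is_infobox_py_alt]
  exact core (PySem.Chars.lower (PySem.Chars.strip s.toList))
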